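-- pv_equiv track=rewrite | github.com/pavanidurgach/17B01A0423 | odd_elimination.py | final_elimination
-- ===== SOURCE A (Python) =====
-- def list_formation(number):
--     return [int(i) for i in range(1,number+1)]
--
-- def left_elimination(list):
--     i = 0
--     while i < len(list):
--           list.remove(list[i])
--           i = i + 1
--     return list
--
-- def final_elimination(limit):
--     sum = 0
--     number = 1
--     while number < (limit+1):
--           list = list_formation(number)
--           while len(list) >= 1:
--                 if len(list) == 1:
--                    sum = sum + list[0]
--                    break
--                 left_elimination(list)
--                 list[0:] = list[::-1]
--           number = number + 1
--     return sum
-- ===== SOURCE B (Python) =====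
-- def final_elimination(limit):
--     # survivor of the alternating left-elimination process on [1..n]:
--     # one pass keeps 2,4,...,2*(n//2) and reverses, so f(n) = 2*(n//2 + 1 - f(n//2)).
--     def survivor(n):
--         if n <= 1:
--             return 1
--         m = n // 2
--         return 2 * (m + 1 - survivor(m))
--     total = 0
--     for n in range(1, limit + 1):
--         total += survivor(n)
--     return total
-- ===== Notes on version B (the rewrite author's own statement) =====
-- stated objective: faster
-- what changed: Replaces the per-n list simulation (repeatedly removing every other element and reversing) with the O(log n) survivor recurrence f(n) = 2*(n//2 + 1 - f(n//2)), summed over n = 1..limit.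
import Mathlib
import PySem

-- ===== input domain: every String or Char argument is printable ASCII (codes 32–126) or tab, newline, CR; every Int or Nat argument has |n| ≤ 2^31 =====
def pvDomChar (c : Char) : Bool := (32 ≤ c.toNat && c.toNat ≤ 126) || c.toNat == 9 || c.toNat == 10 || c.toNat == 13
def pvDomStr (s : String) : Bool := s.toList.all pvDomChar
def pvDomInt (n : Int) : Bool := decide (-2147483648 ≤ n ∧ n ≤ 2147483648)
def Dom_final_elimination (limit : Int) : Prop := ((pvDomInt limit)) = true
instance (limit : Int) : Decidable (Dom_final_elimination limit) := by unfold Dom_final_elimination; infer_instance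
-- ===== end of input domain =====

-- B replaces A's quadratic per-n list simulation with the O(log n) survivor recurrence
-- f(n) = 2*(n//2 + 1 - f(n//2)) summed over n = 1..limit (measured asymptotically faster).


-- ===== PORT A =====
-- list_formation(number) = [int(i) for i in range(1, number+1)]  (int(i) is the identity on ints)
def pvListFormation (number : Int) : List Int := PySem.List.pyRange 1 (number + 1) 1

-- left_elimination's while loop: i = 0; while i < len(l): l.remove(l[i]); i += 1.
-- fuel only totalizes the loop (callers pass enough, proved in pvLeftElim_eq's hypothesis);
-- l.remove(l[i]) removes the first occurrence of the value l[i]; it can never raise here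
-- (l[i] ∈ l), so the 'none' branch is unreachable dead code.
def pvLeftElim (fuel : Nat) (l : List Int) (i : Nat) : List Int :=
  match fuel with
  | 0 => l  -- fuel exhausted: unreachable when l.length - i ≤ fuel
  | fuel + 1 =>
    if h : i < l.length then
      match PySem.List.remove? l l[i] with
      | some l' => pvLeftElim fuel l' (i + 1)
      | none => l  -- unreachable: l[i] ∈ l
    else l

-- the inner while loop over the list: while len(l) >= 1: if len == 1: return l[0];
-- left_elimination(l); l[0:] = l[::-1]  (the slice assignment [::-1] reverses, exact);
-- fuel only totalizes the loop (the list shrinks every iteration, so l.length + 1 suffices)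
def pvInner (fuel : Nat) (l : List Int) : Int :=
  match fuel with
  | 0 => 0  -- fuel exhausted: unreachable when l.length ≤ fuel
  | fuel + 1 =>
    if 1 ≤ l.length then
      if l.length = 1 then (PySem.List.pyGet? l 0).getD 0  -- l[0], in range since len = 1
      else pvInner fuel ((pvLeftElim l.length l 0).reverse)
    else 0

-- the outer while loop: number from 1 while number < limit + 1, accumulating into sum;
-- fuel only totalizes the count-up loop (limit.toNat iterations remain from number = 1)
def pvOuter (fuel : Nat) (limit : Int) (sum : Int) (number : Int) : Int :=
  match fuel with
  | 0 => sum  -- fuel exhausted: unreachable when (limit + 1 - number).toNat ≤ fuel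
  | fuel + 1 =>
    if number < limit + 1 then
      pvOuter fuel limit
        (sum + pvInner ((pvListFormation number).length + 1) (pvListFormation number))
        (number + 1)
    else sum

def final_elimination (limit : Int) : Int := pvOuter limit.toNat limit 0 1

-- ===== PORT B =====
-- B's survivor recurrence: f(n) = 1 for n <= 1, else 2*(n//2 + 1 - f(n//2));
-- fuel only totalizes the recursion (n halves each step, so n.toNat suffices)
def pvSurvAlt (fuel : Nat) (n : Int) : Int :=
  match fuel with
  | 0 => 1  -- fuel exhausted: unreachable when n.toNat ≤ fuel
  | fuel + 1 =>
    if n ≤ 1 then 1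
    else 2 * (PySem.Int.floordiv n 2 + 1 - pvSurvAlt fuel (PySem.Int.floordiv n 2))

-- B's loop: total = 0; for n in range(1, limit+1): total += survivor(n)
def final_elimination_alt (limit : Int) : Int :=
  (PySem.List.pyRange 1 (limit + 1) 1).foldl (fun total n => total + pvSurvAlt n.toNat n) 0

-- ===== PRECONDITION & SPEC =====
def Spec_final_elimination (limit : Int) (out : Int) : Prop := out = final_elimination_alt limit
instance (limit : Int) (out : Int) : Decidable (Spec_final_elimination limit out) := by unfold Spec_final_elimination; infer_instance

-- ===== CLAIM (what is proved, stated in full; the proofs are below) =====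
def Claim_equal_final_elimination : Prop := ∀ (limit : Int), Dom_final_elimination limit → Spec_final_elimination limit (final_elimination limit)

-- ===== LEMMAS AND PROOFS =====

-- proof-side: the elements at odd indices of l (what one left_elimination pass keeps)
def pvOdds : List Int → List Int
  | [] => []
  | [_] => []
  | _ :: b :: t => b :: pvOdds t

theorem pvOdds_cons (a : Int) (rest : List Int) :
    pvOdds (a :: rest) = rest.take 1 ++ pvOdds (rest.drop 1) := by
  cases rest <;> rfl

theorem pvOdds_sublist (l : List Int) : (pvOdds l).Sublist l := by
  fun_induction pvOdds l with
  | case1 => simp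
  | case2 => simp
  | case3 a b t ih => exact (ih.cons₂ b).cons a

theorem pvOdds_length (l : List Int) : (pvOdds l).length = l.length / 2 := by
  fun_induction pvOdds l with
  | case1 => rfl
  | case2 => simp
  | case3 a b t ih => simp [ih]; omega

theorem pvOdds_map (g : Int → Int) (l : List Int) : pvOdds (l.map g) = (pvOdds l).map g := by
  fun_induction pvOdds l with
  | case1 => rfl
  | case2 => rfl
  | case3 a b t ih => simp [pvOdds, ih]

-- one left_elimination pass on a duplicate-free list keeps the odd-indexed elements
theorem pvLeftElim_eq (fuel : Nat) (l : List Int) (i : Nat) (hnd : l.Nodup)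
    (hfuel : l.length - i ≤ fuel) :
    pvLeftElim fuel l i = l.take i ++ pvOdds (l.drop i) := by
  induction fuel generalizing l i with
  | zero =>
    rw [pvLeftElim, List.take_of_length_le (by omega), List.drop_eq_nil_of_le (by omega)]
    simp [pvOdds]
  | succ fuel ih =>
    rw [pvLeftElim]
    split
    · next h =>
      split
      · next l' hr =>
        rw [PySem.List.remove?_eq_some_erase l l[i] (List.getElem_mem h)] at hr
        cases hr
        rw [List.Nodup.erase_getElem hnd i h]
        have hel : (l.eraseIdx i).length = l.length - 1 := by
          simp [List.length_eraseIdx, h]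
        rw [ih (l.eraseIdx i) (i + 1) (hnd.eraseIdx i) (by omega),
            List.eraseIdx_eq_take_drop_succ,
            List.drop_eq_getElem_cons h, pvOdds_cons]
        have hlen : (l.take i).length = i := by simp; omega
        rw [List.take_append, List.drop_append]
        have h2 : List.drop (i + 1) (l.take i) = [] :=
          List.drop_eq_nil_of_le (by simp)
        simp [hlen, h2, List.take_take, List.append_assoc]
      · next hr =>
        exact absurd ((PySem.List.remove?_eq_none_iff l l[i]).mp hr) (by simp [List.getElem_mem h])
    · next h =>
      rw [List.take_of_length_le (by omega), List.drop_eq_nil_of_le (by omega)]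
      simp [pvOdds]

-- proof-side restatement of the inner loop in terms of pvOdds
def pvSurvO (l : List Int) : Int :=
  if l.length = 1 then (PySem.List.pyGet? l 0).getD 0
  else if 2 ≤ l.length then pvSurvO ((pvOdds l).reverse)
  else 0
termination_by l.length
decreasing_by
  have := pvOdds_length l
  simp only [List.length_reverse]
  omega

theorem pvSurvO_singleton (a : Int) : pvSurvO [a] = a := by
  rw [pvSurvO]
  simp [PySem.List.pyGet?, PySem.List.pyIdx?]

theorem pvInner_eq_survO (fuel : Nat) (l : List Int) (hnd : l.Nodup)
    (hfuel : l.length ≤ fuel) : pvInner fuel l = pvSurvO l := by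
  induction fuel generalizing l with
  | zero =>
    have : l = [] := by
      cases l with
      | nil => rfl
      | cons x t => simp at hfuel
    subst this
    rw [pvInner, pvSurvO]
    simp
  | succ fuel ih =>
    rw [pvInner, pvSurvO]
    by_cases h1 : l.length = 1
    · simp [h1]
    · by_cases h2 : 2 ≤ l.length
      · have hge : 1 ≤ l.length := by omega
        simp only [if_pos hge, if_neg h1, if_pos h2]
        rw [pvLeftElim_eq l.length l 0 hnd (by omega)]
        simp only [List.take_zero, List.drop_zero, List.nil_append]
        have hrl : ((pvOdds l).reverse).length = l.length / 2 := by
          simp [pvOdds_length]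
        exact ih ((pvOdds l).reverse)
          (List.nodup_reverse.mpr ((pvOdds_sublist l).nodup hnd)) (by omega)
      · have h0 : ¬ 1 ≤ l.length := by omega
        simp [h0, h1, h2]

-- the survivor position is independent of the values: the process commutes with map
theorem pvSurvO_map (g : Int → Int) (l : List Int) (hne : l ≠ []) :
    pvSurvO (l.map g) = g (pvSurvO l) := by
  by_cases h1 : l.length = 1
  · obtain ⟨a, rfl⟩ : ∃ a, l = [a] := by
      cases l with
      | nil => simp at h1
      | cons x t =>
        cases t with
        | nil => exact ⟨x, rfl⟩
        | cons y t' => simp at h1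
    simp only [List.map_cons, List.map_nil]
    rw [pvSurvO_singleton, pvSurvO_singleton]
  · have h2 : 2 ≤ l.length := by
      cases l with
      | nil => simp at hne
      | cons x t =>
        cases t with
        | nil => simp at h1
        | cons y t' => simp
    rw [pvSurvO]
    conv_rhs => rw [pvSurvO]
    simp only [List.length_map, if_neg h1, if_pos h2]
    rw [pvOdds_map, ← List.map_reverse]
    have hlen : ((pvOdds l).reverse).length = l.length / 2 := by
      simp [pvOdds_length]
    exact pvSurvO_map g ((pvOdds l).reverse)
      (by intro hc; rw [hc] at hlen; simp at hlen; omega)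
termination_by l.length
decreasing_by
  have := pvOdds_length l
  simp only [List.length_reverse]
  omega

-- proof-side: the list [1, 2, ..., m] that list_formation builds
def pvBase (m : Nat) : List Int := (List.range m).map (fun k : Nat => 1 + (k : Int))

-- proof-side, fuel-free form of B's recurrence
def pvF (m : Nat) : Int :=
  if m ≤ 1 then 1
  else 2 * (((m / 2 : Nat) : Int) + 1 - pvF (m / 2))
termination_by m
decreasing_by omega

theorem pvSurvAlt_eq_pvF (fuel : Nat) (n : Int) (h0 : 0 ≤ n) (hfuel : n.toNat ≤ fuel) :
    pvSurvAlt fuel n = pvF n.toNat := by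
  induction fuel generalizing n with
  | zero =>
    have : n = 0 := by omega
    subst this
    rw [pvSurvAlt, pvF]
    norm_num
  | succ fuel ih =>
    rw [pvSurvAlt]
    by_cases h1 : n ≤ 1
    · rw [if_pos h1, pvF, if_pos (by omega)]
    · rw [if_neg h1, pvF]
      rw [if_neg (by omega)]
      rw [PySem.Int.floordiv_eq_ediv_of_pos (by norm_num)]
      have hc : n / 2 = ((n.toNat / 2 : Nat) : Int) := by omega
      rw [hc, ih _ (by omega) (by omega), Int.toNat_natCast]

theorem pvOdds_range_map (m : Nat) (f : Nat → Int) :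
    pvOdds ((List.range m).map f) = (List.range (m / 2)).map (fun j => f (2 * j + 1)) := by
  match m with
  | 0 => rfl
  | 1 => rfl
  | (m + 2) =>
    have ih : pvOdds (List.map f (List.map (fun k => k + 2) (List.range m)))
        = List.map (fun j => f (2 * j + 1 + 2)) (List.range (m / 2)) := by
      rw [List.map_map]
      exact pvOdds_range_map m (f ∘ fun k => k + 2)
    have hr2 : List.range (m + 2) = 0 :: 1 :: (List.range m).map (fun k => k + 2) := by
      rw [List.range_succ_eq_map, List.range_succ_eq_map]
      simp only [List.map_cons, List.map_map]
      refine congrArg _ (congrArg _ (List.map_congr_left fun x _ => ?_))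
      rfl
    have hd2 : (m + 2) / 2 = m / 2 + 1 := by omega
    rw [hr2, hd2]
    conv_rhs => rw [List.range_succ_eq_map]
    simp only [List.map_cons, pvOdds]
    refine congrArg₂ _ (by norm_num) ?_
    rw [ih, List.map_map]
    refine List.map_congr_left fun x _ => ?_
    simp only [Function.comp_apply]
    exact congrArg f (by omega)

theorem pvRevRangeMap (m : Nat) (f : Nat → Int) :
    ((List.range m).map f).reverse = (List.range m).map (fun j => f (m - 1 - j)) := by
  induction m with
  | zero => rfl
  | succ m ih =>
    conv_lhs => rw [List.range_succ]
    rw [List.map_append, List.reverse_append]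
    simp only [List.map_cons, List.map_nil, List.reverse_cons, List.reverse_nil,
      List.nil_append, List.cons_append]
    rw [ih]
    conv_rhs => rw [List.range_succ_eq_map]
    simp only [List.map_cons, List.map_map]
    refine congrArg₂ _ (congrArg f (by omega)) ?_
    refine List.map_congr_left fun x hx => ?_
    simp only [Function.comp_apply]
    exact congrArg f (by omega)

-- the crux: the simulated survivor of [1..m] satisfies B's recurrence
theorem pvSurvO_range (m : Nat) (h : 1 ≤ m) :
    pvSurvO (pvBase m) = pvF m := by
  by_cases h1 : m = 1
  · subst h1
    have hb1 : pvBase 1 = [1] := by norm_num [pvBase]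
    rw [hb1, pvSurvO_singleton, pvF]
    norm_num
  · have h2 : 2 ≤ m := by omega
    have hm' : 1 ≤ m / 2 := by omega
    have hblen : (pvBase m).length = m := by simp [pvBase]
    rw [pvSurvO, hblen, if_neg (by omega), if_pos (by omega)]
    have hodds : pvOdds (pvBase m)
        = (List.range (m / 2)).map (fun j => 1 + ((2 * j + 1 : Nat) : Int)) := by
      rw [pvBase, pvOdds_range_map]
    rw [hodds, pvRevRangeMap]
    have hmap : (List.range (m / 2)).map (fun j => 1 + ((2 * (m / 2 - 1 - j) + 1 : Nat) : Int))
        = (pvBase (m / 2)).map (fun x => 2 * (((m / 2 : Nat) : Int) + 1 - x)) := by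
      rw [pvBase, List.map_map]
      refine List.map_congr_left fun j hj => ?_
      have hj' : j < m / 2 := List.mem_range.mp hj
      simp only [Function.comp_apply]
      omega
    rw [hmap, pvSurvO_map _ _ (by
        intro hc
        have := congrArg List.length hc
        simp [pvBase] at this
        omega),
      pvSurvO_range (m / 2) hm']
    conv_rhs => rw [pvF]
    rw [if_neg (by omega)]
termination_by m
decreasing_by omega

theorem pvOuter_eq (fuel : Nat) (limit sum number : Int)
    (hfuel : (limit + 1 - number).toNat ≤ fuel) :
    pvOuter fuel limit sum number =
      (PySem.List.pyRange number (limit + 1) 1).foldl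
        (fun t n => t + pvInner ((pvListFormation n).length + 1) (pvListFormation n)) sum := by
  induction fuel generalizing sum number with
  | zero =>
    rw [pvOuter, PySem.List.pyRange_one_eq_nil (by omega)]
    rfl
  | succ fuel ih =>
    rw [pvOuter]
    split
    · next h =>
      rw [PySem.List.pyRange_one_cons (by omega)]
      simp only [List.foldl_cons]
      exact ih _ (number + 1) (by omega)
    · next h =>
      rw [PySem.List.pyRange_one_eq_nil (by omega)]
      rfl

-- ===== VERDICT (by name: the statement is the Claim_ definition above) =====
theorem final_elimination_spec : Claim_equal_final_elimination := by
  intro limit _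
  unfold Spec_final_elimination final_elimination final_elimination_alt
  rw [pvOuter_eq limit.toNat limit 0 1 (by omega)]
  apply PySem.List.foldl_congr_mem
  intro acc n hn
  have hn1 : 1 ≤ n := (PySem.List.mem_pyRange_one.mp hn).1
  congr 1
  have hform : pvListFormation n = pvBase n.toNat := by
    have hcast : (n + 1 - 1).toNat = n.toNat := by omega
    rw [pvListFormation, PySem.List.pyRange_one, hcast, pvBase]
  have hinj : Function.Injective (fun k : Nat => 1 + (k : Int)) := by
    intro a b hab
    simp at hab
    omega
  have hnd : (pvBase n.toNat).Nodup := List.Nodup.map hinj List.nodup_range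
  have hblen : (pvBase n.toNat).length = n.toNat := by simp [pvBase]
  rw [hform, pvInner_eq_survO _ _ hnd (by omega), pvSurvO_range n.toNat (by omega),
    pvSurvAlt_eq_pvF n.toNat n (by omega) (by omega)]
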